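-- pv_equiv track=rewrite | github.com/ClanClanClanClan/math-pdf-manager | src/core/tokenization.py | iterate_nonmath_segments
-- ===== SOURCE A (Python) =====
-- from typing import Iterable, List, Tuple
--
-- def iterate_nonmath_segments(
--     text: str,
--     regions: List[Tuple[int, int]]
-- ) -> Iterable[Tuple[int, int, str]]:
--     """
--     Yield (start, end, slice) triples for every part of *text* that is
--     **not** covered by a math region, but be tolerant when the list of
--     regions is stale (i.e. it was computed before another normaliser
--     changed the string length).
--     """
--     n = len(text)
--
--     # 1. Discard / clamp invalid regions
--     clean: List[Tuple[int, int]] = []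
--     for s, e in regions:
--         s = max(0, min(s, n))
--         e = max(0, min(e, n))
--         if s < e:                       # keep only non-empty spans
--             clean.append((s, e))
--
--     # 2. Sort and merge any overlaps
--     clean.sort()
--     merged: List[Tuple[int, int]] = []
--     for s, e in clean:
--         if merged and s <= merged[-1][1]:
--             merged[-1] = (merged[-1][0], max(merged[-1][1], e))
--         else:
--             merged.append((s, e))
--
--     # 3. Yield the complementary (non-math) slices
--     last = 0
--     for s, e in merged:
--         if last < s:
--             yield last, s, text[last:s]
--         last = e
--     if last < n:
--         yield last, n, text[last:]
-- ===== SOURCE B (Python) =====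
-- from typing import Iterable, List, Tuple
--
-- def iterate_nonmath_segments(
--     text: str,
--     regions: List[Tuple[int, int]]
-- ) -> Iterable[Tuple[int, int, str]]:
--     """Mask-based re-implementation: mark covered characters in a byte
--     mask (overlaps absorbed for free, no sort/merge), then emit the
--     uncovered runs in one left-to-right scan."""
--     n = len(text)
--     mask = bytearray(n)
--     for s, e in regions:
--         s = max(0, min(s, n))
--         e = max(0, min(e, n))
--         mask[s:e] = b"\x01" * (e - s)
--     run = None                      # start of the current uncovered run
--     for i in range(n):
--         if mask[i]:
--             if run is not None:
--                 yield run, i, text[run:i]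
--                 run = None
--         elif run is None:
--             run = i
--     if run is not None:
--         yield run, n, text[run:]
-- ===== Notes on version B (the rewrite author's own statement) =====
-- stated objective: alternative
-- what changed: Replaces clamp/sort/merge-intervals followed by a complement walk with a per-character boolean coverage mask (clamped regions marked by slice assignment, overlaps absorbed for free) scanned once left-to-right to emit the uncovered runs.
import Mathlib
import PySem

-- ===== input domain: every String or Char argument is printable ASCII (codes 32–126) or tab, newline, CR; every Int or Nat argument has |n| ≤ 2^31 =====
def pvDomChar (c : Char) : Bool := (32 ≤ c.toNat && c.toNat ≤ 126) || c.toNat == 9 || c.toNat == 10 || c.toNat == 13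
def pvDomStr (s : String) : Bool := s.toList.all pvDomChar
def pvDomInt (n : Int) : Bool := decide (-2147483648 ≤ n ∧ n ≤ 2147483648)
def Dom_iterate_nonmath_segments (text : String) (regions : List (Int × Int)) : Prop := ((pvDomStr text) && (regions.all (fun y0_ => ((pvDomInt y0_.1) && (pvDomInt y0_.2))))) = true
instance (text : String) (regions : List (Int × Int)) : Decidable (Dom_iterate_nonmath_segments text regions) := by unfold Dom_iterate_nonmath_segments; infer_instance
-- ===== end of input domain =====

-- B replaces A's clamp/sort/merge interval pipeline by a per-character coverage mask
-- scanned once left-to-right (alternative decomposition, same exact output).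

-- ===== PORT A =====
-- step of A's clean-building loop (clamp, keep non-empty spans)
def pvCleanStep (n : Int) (acc : List (Int × Int)) (q : Int × Int) : List (Int × Int) :=
  -- s = max 0 (min q.1 n), e = max 0 (min q.2 n) inlined
  if max 0 (min q.1 n) < max 0 (min q.2 n) then acc ++ [(max 0 (min q.1 n), max 0 (min q.2 n))] else acc

-- step of A's merge loop ('if merged and s <= merged[-1][1]')
def pvMergeStep (m : List (Int × Int)) (q : Int × Int) : List (Int × Int) :=
  match m.getLast? with
  | some lastI =>
      if q.1 ≤ lastI.2 then m.dropLast ++ [(lastI.1, max lastI.2 q.2)]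
      else m ++ [q]
  | none => m ++ [q]

-- step of A's final complement loop (state = (last, yielded so far))
def pvCompStep (text : String) (st : Int × List (Int × Int × String)) (q : Int × Int) :
    Int × List (Int × Int × String) :=
  (q.2, if st.1 < q.1 then st.2 ++ [(st.1, q.1, PySem.Str.slice text (some st.1) (some q.1))] else st.2)

def iterate_nonmath_segments (text : String) (regions : List (Int × Int)) : List (Int × Int × String) :=
  let n : Int := PySem.Str.len text
  let clean := regions.foldl (pvCleanStep n) []
  let cleanS := PySem.List.sorted2 clean Prod.fst Prod.snd      -- clean.sort(): lexicographic tuple sort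
  let merged := cleanS.foldl pvMergeStep []
  let r := merged.foldl (pvCompStep text) (0, [])
  if r.1 < n then r.2 ++ [(r.1, n, PySem.Str.slice text (some r.1) none)] else r.2

-- ===== PORT B =====
-- mark mask[s:e] with 1s (exact for B's slice assignment mask[s:e] = b"\x01"*(e-s))
def pvMaskStep (n : Nat) (m : List Bool) (q : Int × Int) : List Bool :=
  -- s = max 0 (min q.1 n), e = max 0 (min q.2 n) inlined
  m.mapIdx (fun i b => b ||
    decide (max 0 (min q.1 (n : Int)) ≤ (i : Int) ∧ (i : Int) < max 0 (min q.2 (n : Int))))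

-- B's single left-to-right scan over the mask; run = start of current uncovered run
def pvScanNonmath (text : String) : List Bool → Nat → Option Nat → List (Int × Int × String)
  | [], i, some r => [((r : Int), (i : Int), PySem.Str.slice text (some (r : Int)) none)]
  | [], _, none => []
  | b :: rest, i, run =>
      if b then
        match run with
        | some r => ((r : Int), (i : Int), PySem.Str.slice text (some (r : Int)) (some (i : Int))) ::
            pvScanNonmath text rest (i + 1) none
        | none => pvScanNonmath text rest (i + 1) none
      else
        match run with
        | none => pvScanNonmath text rest (i + 1) (some i)
        | some r => pvScanNonmath text rest (i + 1) (some r)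

def iterate_nonmath_segments_alt (text : String) (regions : List (Int × Int)) : List (Int × Int × String) :=
  let n : Nat := text.toList.length
  let mask := regions.foldl (pvMaskStep n) (List.replicate n false)
  pvScanNonmath text mask 0 none

-- ===== PRECONDITION & SPEC =====
def Spec_iterate_nonmath_segments (text : String) (regions : List (Int × Int)) (out : List (Int × Int × String)) : Prop := out = iterate_nonmath_segments_alt text regions
instance (text : String) (regions : List (Int × Int)) (out : List (Int × Int × String)) : Decidable (Spec_iterate_nonmath_segments text regions out) := by unfold Spec_iterate_nonmath_segments; infer_instance

-- ===== CLAIM (what is proved, stated in full; the proofs are below) =====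
def Claim_equal_iterate_nonmath_segments : Prop := ∀ (text : String) (regions : List (Int × Int)), Dom_iterate_nonmath_segments text regions → Spec_iterate_nonmath_segments text regions (iterate_nonmath_segments text regions)

-- ===== LEMMAS AND PROOFS =====

-- coverage of a position by a list of intervals, as a Bool
def pvCovB (L : List (Int × Int)) (p : Nat) : Bool :=
  L.any (fun q => decide (q.1 ≤ (p : Int) ∧ (p : Int) < q.2))

-- coverage of a position by the clamped regions
def pvCovC (n : Int) (rs : List (Int × Int)) (p : Nat) : Bool :=
  rs.any (fun q => decide (max 0 (min q.1 n) ≤ (p : Int) ∧ (p : Int) < max 0 (min q.2 n)))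

-- invariant of A's merged list: strictly separated, in-bounds, non-empty intervals
def pvInv (n : Int) (M : List (Int × Int)) : Prop :=
  M.Pairwise (fun a b => a.2 < b.1) ∧ ∀ x ∈ M, 0 ≤ x.1 ∧ x.1 < x.2 ∧ x.2 ≤ n

-- A's complement loop, as a recursion (yielding form)
def pvCompA (text : String) (n : Int) : List (Int × Int) → Int → List (Int × Int × String)
  | [], last => if last < n then [(last, n, PySem.Str.slice text (some last) none)] else []
  | q :: rest, last =>
      (if last < q.1 then [(last, q.1, PySem.Str.slice text (some last) (some q.1))] else []) ++
        pvCompA text n rest q.2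

-- ---- clean ----
theorem pvClean_eq (n : Int) : ∀ (rs acc : List (Int × Int)),
    rs.foldl (pvCleanStep n) acc = acc ++ rs.filterMap (fun q =>
      let s := max 0 (min q.1 n); let e := max 0 (min q.2 n)
      if s < e then some (s, e) else none) := by
  intro rs
  induction rs with
  | nil => intro acc; simp
  | cons q rest ih =>
      intro acc
      simp only [List.foldl_cons, List.filterMap_cons, pvCleanStep]
      split
      all_goals rw [ih]
      all_goals simp

theorem pvClean_bounds (n : Int) (hn : 0 ≤ n) (rs : List (Int × Int)) :
    ∀ x ∈ rs.foldl (pvCleanStep n) [], 0 ≤ x.1 ∧ x.1 < x.2 ∧ x.2 ≤ n := by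
  intro x hx
  rw [pvClean_eq] at hx
  simp only [List.nil_append, List.mem_filterMap] at hx
  obtain ⟨q, _, hq⟩ := hx
  split at hq
  · cases hq; refine ⟨by omega, by omega, by omega⟩
  · cases hq

theorem pvCovB_append (L₁ L₂ : List (Int × Int)) (p : Nat) :
    pvCovB (L₁ ++ L₂) p = (pvCovB L₁ p || pvCovB L₂ p) := by
  simp [pvCovB]

theorem pvCovB_clean_aux (n : Int) (p : Nat) : ∀ (rs acc : List (Int × Int)),
    pvCovB (rs.foldl (pvCleanStep n) acc) p = (pvCovB acc p || pvCovC n rs p) := by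
  intro rs
  induction rs with
  | nil => intro acc; simp [pvCovC]
  | cons q rest ih =>
      intro acc
      rw [List.foldl_cons, ih]
      have hcov : pvCovB (pvCleanStep n acc q) p =
          (pvCovB acc p || decide (max 0 (min q.1 n) ≤ (p:Int) ∧ (p:Int) < max 0 (min q.2 n))) := by
        unfold pvCleanStep
        split
        · rw [pvCovB_append]; simp [pvCovB]
        · have hd : decide (max 0 (min q.1 n) ≤ (p:Int) ∧ (p:Int) < max 0 (min q.2 n)) = false := by
            simp only [decide_eq_false_iff_not]; omega
          rw [hd, Bool.or_false]
      rw [hcov]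
      have hc : pvCovC n (q :: rest) p =
          (decide (max 0 (min q.1 n) ≤ (p:Int) ∧ (p:Int) < max 0 (min q.2 n)) || pvCovC n rest p) := by
        simp [pvCovC]
      rw [hc, Bool.or_assoc]

theorem pvCovB_clean (n : Int) (rs : List (Int × Int)) (p : Nat) :
    pvCovB (rs.foldl (pvCleanStep n) []) p = pvCovC n rs p := by
  rw [pvCovB_clean_aux]
  simp [pvCovB]

-- ---- sorted ------ ---- sorted ----
theorem pvPairwise_insertBy {α : Type} {R : α → α → Prop} (bef : α → α → Bool)
    (h1 : ∀ a b, bef a b = true → R a b) (h2 : ∀ a b, bef a b = false → R b a)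
    (htrans : ∀ a b c, R a b → R b c → R a c) :
    ∀ (x : α) (ys : List α), ys.Pairwise R → (PySem.List.insertBy bef x ys).Pairwise R := by
  intro x ys
  induction ys with
  | nil => intro _; simp [PySem.List.insertBy]
  | cons y ys ih =>
      intro hp
      rw [List.pairwise_cons] at hp
      obtain ⟨hy, hys⟩ := hp
      show (if bef x y = true then x :: y :: ys else y :: PySem.List.insertBy bef x ys).Pairwise R
      split
      · rename_i hxy
        refine List.Pairwise.cons ?_ (List.Pairwise.cons hy hys)
        intro z hz
        rcases List.mem_cons.mp hz with rfl | hz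
        · exact h1 _ _ hxy
        · exact htrans _ _ _ (h1 _ _ hxy) (hy _ hz)
      · rename_i hxy
        refine List.Pairwise.cons ?_ (ih hys)
        intro z hz
        rcases (PySem.List.mem_insertBy bef x z ys).mp hz with rfl | hz
        · exact h2 _ _ (by simpa using hxy)
        · exact hy _ hz

theorem pvSorted2_pairwise_fst_le (xs : List (Int × Int)) :
    (PySem.List.sorted2 xs Prod.fst Prod.snd).Pairwise (fun a b => a.1 ≤ b.1) := by
  have key : ∀ (xs acc : List (Int × Int)), acc.Pairwise (fun a b : Int × Int => a.1 ≤ b.1) →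
      (List.foldl (fun acc x => PySem.List.insertBy
        (fun a b : Int × Int => decide (a.1 < b.1) || (!decide (b.1 < a.1) && decide (a.2 < b.2)))
        x acc) acc xs).Pairwise (fun a b : Int × Int => a.1 ≤ b.1) := by
    intro xs
    induction xs with
    | nil => intro acc hp; simpa using hp
    | cons x xs ih =>
        intro acc hp
        rw [List.foldl_cons]
        refine ih _ (pvPairwise_insertBy (R := fun a b : Int × Int => a.1 ≤ b.1) _ ?_ ?_ (fun a b c hab hbc => le_trans hab hbc) x acc hp)
        · intro a b h
          simp only [Bool.or_eq_true, Bool.and_eq_true, decide_eq_true_eq,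
            Bool.not_eq_true', decide_eq_false_iff_not] at h
          omega
        · intro a b h
          simp only [Bool.or_eq_false_iff, Bool.and_eq_false_iff,
            Bool.not_eq_false', decide_eq_true_eq, decide_eq_false_iff_not] at h
          omega
  have h0 := key xs [] (by simp)
  simpa [PySem.List.sorted2] using h0

-- ---- merge ----
theorem pvEq_dropLast_concat {α : Type} (l : List α) (x : α) (h : l.getLast? = some x) :
    l = l.dropLast ++ [x] := by
  have hne : l ≠ [] := by rintro rfl; simp at h
  have h2 := List.getLast?_eq_some_getLast hne
  rw [h2, Option.some_inj] at h
  rw [← h]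
  exact (List.dropLast_concat_getLast hne).symm

theorem pvDecide_or {P Q R : Prop} [Decidable P] [Decidable Q] [Decidable R]
    (h : P ↔ Q ∨ R) : decide P = (decide Q || decide R) := by
  by_cases hq : Q <;> by_cases hr : R <;> simp [hq, hr, h]

theorem pvCovB_singleton (x : Int × Int) (p : Nat) :
    pvCovB [x] p = decide (x.1 ≤ (p : Int) ∧ (p : Int) < x.2) := by
  simp [pvCovB]

theorem pvMerge_fold (n : Int) : ∀ (input acc : List (Int × Int)),
    input.Pairwise (fun a b => a.1 ≤ b.1) →
    (∀ y ∈ input, 0 ≤ y.1 ∧ y.1 < y.2 ∧ y.2 ≤ n) →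
    pvInv n acc →
    (∀ x ∈ acc, ∀ y ∈ input, x.1 ≤ y.1) →
    pvInv n (input.foldl pvMergeStep acc) ∧
      (∀ p : Nat, pvCovB (input.foldl pvMergeStep acc) p = (pvCovB acc p || pvCovB input p)) := by
  intro input
  induction input with
  | nil =>
      intro acc _ _ hinv _
      exact ⟨hinv, fun p => by simp [pvCovB]⟩
  | cons q rest ih =>
      intro acc hsorted hbounds hinv hle
      rw [List.pairwise_cons] at hsorted
      obtain ⟨hqle, hsort'⟩ := hsorted
      have hqb := hbounds q (List.mem_cons_self ..)
      have hrb : ∀ y ∈ rest, 0 ≤ y.1 ∧ y.1 < y.2 ∧ y.2 ≤ n :=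
        fun y hy => hbounds y (List.mem_cons_of_mem _ hy)
      -- analyse one merge step
      have hstep : pvInv n (pvMergeStep acc q) ∧
          (∀ x ∈ pvMergeStep acc q, ∀ y ∈ rest, x.1 ≤ y.1) ∧
          (∀ p : Nat, pvCovB (pvMergeStep acc q) p =
            (pvCovB acc p || decide (q.1 ≤ (p : Int) ∧ (p : Int) < q.2))) := by
        cases hl : acc.getLast? with
        | none =>
            have hacc : acc = [] := List.getLast?_eq_none_iff.mp hl
            subst hacc
            simp only [pvMergeStep, List.getLast?_nil, List.nil_append]
            refine ⟨⟨List.pairwise_singleton .., by simpa using hqb⟩, ?_, ?_⟩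
            · intro x hx y hy
              rcases List.mem_singleton.mp hx with rfl
              exact hqle y hy
            · intro p; simp [pvCovB]
        | some lastI =>
            have hacc : acc = acc.dropLast ++ [lastI] := pvEq_dropLast_concat _ _ hl
            have hlmem : lastI ∈ acc := by rw [hacc]; simp
            have hlb := hinv.2 lastI hlmem
            have hl1q : lastI.1 ≤ q.1 := hle lastI hlmem q (List.mem_cons_self ..)
            have hpw := hinv.1
            rw [hacc, List.pairwise_append] at hpw
            obtain ⟨hpwD, _, hDlast⟩ := hpw
            have hDlt : ∀ x ∈ acc.dropLast, x.2 < lastI.1 := by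
              intro x hx
              simpa using hDlast x hx lastI (List.mem_singleton_self _)
            simp only [pvMergeStep, hl]
            split
            · -- overlap: merge into (lastI.1, max lastI.2 q.2)
              rename_i hover
              refine ⟨⟨?_, ?_⟩, ?_, ?_⟩
              · rw [List.pairwise_append]
                exact ⟨hpwD, List.pairwise_singleton .., by
                  intro a ha b hb
                  rcases List.mem_singleton.mp hb with rfl
                  exact hDlt a ha⟩
              · intro x hx
                rcases List.mem_append.mp hx with hx | hx
                · exact hinv.2 x (by rw [hacc]; exact List.mem_append_left _ hx)
                · rcases List.mem_singleton.mp hx with rfl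
                  refine ⟨hlb.1, ?_, ?_⟩ <;> simp <;> omega
              · intro x hx y hy
                rcases List.mem_append.mp hx with hx | hx
                · exact hle x (by rw [hacc]; exact List.mem_append_left _ hx) y
                    (List.mem_cons_of_mem _ hy)
                · rcases List.mem_singleton.mp hx with rfl
                  exact le_trans hl1q (hqle y hy)
              · intro p
                rw [pvCovB_append, pvCovB_singleton]
                conv_rhs => rw [hacc, pvCovB_append, pvCovB_singleton]
                rw [Bool.or_assoc]
                congr 1
                show decide (lastI.1 ≤ (p:Int) ∧ (p:Int) < max lastI.2 q.2) = _
                exact pvDecide_or (by omega)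
            · -- disjoint: append q
              rename_i hover
              refine ⟨⟨?_, ?_⟩, ?_, ?_⟩
              · rw [List.pairwise_append]
                refine ⟨hinv.1, List.pairwise_singleton .., ?_⟩
                intro a ha b hb
                rcases List.mem_singleton.mp hb with rfl
                rw [hacc] at ha
                rcases List.mem_append.mp ha with ha | ha
                · have := hDlt a ha; omega
                · rcases List.mem_singleton.mp ha with rfl; omega
              · intro x hx
                rcases List.mem_append.mp hx with hx | hx
                · exact hinv.2 x hx
                · rcases List.mem_singleton.mp hx with rfl; exact hqb
              · intro x hx y hy
                rcases List.mem_append.mp hx with hx | hx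
                · exact hle x hx y (List.mem_cons_of_mem _ hy)
                · rcases List.mem_singleton.mp hx with rfl; exact hqle y hy
              · intro p
                rw [pvCovB_append, pvCovB_singleton]
      obtain ⟨hinv', hle', hcov'⟩ := hstep
      rw [List.foldl_cons]
      obtain ⟨hI, hC⟩ := ih (pvMergeStep acc q) hsort' hrb hinv' hle'
      refine ⟨hI, ?_⟩
      intro p
      rw [hC p, hcov' p]
      simp [pvCovB, Bool.or_assoc]

-- ---- complement loop of A as recursion ----
theorem pvCompA_foldl (text : String) (n : Int) : ∀ (M : List (Int × Int)) (last : Int)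
    (acc : List (Int × Int × String)),
    (let r := M.foldl (pvCompStep text) (last, acc);
      if r.1 < n then r.2 ++ [(r.1, n, PySem.Str.slice text (some r.1) none)] else r.2) =
      acc ++ pvCompA text n M last := by
  intro M
  induction M with
  | nil =>
      intro last acc
      simp only [List.foldl_nil, pvCompA]
      split <;> simp
  | cons q rest ih =>
      intro last acc
      simp only [List.foldl_cons, pvCompA, pvCompStep]
      rw [ih]
      split <;> simp

-- ---- mask ----
theorem pvMask_len (n : Nat) : ∀ (rs : List (Int × Int)) (m : List Bool),
    (rs.foldl (pvMaskStep n) m).length = m.length := by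
  intro rs
  induction rs with
  | nil => intro m; rfl
  | cons q rest ih => intro m; simp [List.foldl_cons, ih, pvMaskStep]

theorem pvMask_get (n : Nat) : ∀ (rs : List (Int × Int)) (m : List Bool) (p : Nat), p < m.length →
    (rs.foldl (pvMaskStep n) m)[p]? = some (m.getD p false || pvCovC (n : Int) rs p) := by
  intro rs
  induction rs with
  | nil =>
      intro m p hp
      simp only [List.foldl_nil, pvCovC, List.any_nil, Bool.or_false]
      rw [List.getElem?_eq_getElem hp, List.getD_eq_getElem _ _ hp]
  | cons q rest ih =>
      intro m p hp
      simp only [List.foldl_cons]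
      have hp' : p < (pvMaskStep n m q).length := by simp [pvMaskStep]; omega
      rw [ih _ _ hp']
      have hg : (pvMaskStep n m q).getD p false =
          (m.getD p false || decide (max 0 (min q.1 (n:Int)) ≤ (p:Int) ∧ (p:Int) < max 0 (min q.2 (n:Int)))) := by
        have hp2 : p < (List.mapIdx (fun i b => b ||
            decide (max 0 (min q.1 (n:Int)) ≤ (i:Int) ∧ (i:Int) < max 0 (min q.2 (n:Int)))) m).length := by
          simpa using hp
        simp only [pvMaskStep]
        rw [List.getD_eq_getElem _ _ hp2, List.getD_eq_getElem _ _ hp]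
        simp
      rw [hg]
      simp [pvCovC, Bool.or_assoc]

-- ---- scan lemmas ----
theorem pvScan_falses (text : String) (mask : List Bool) (k : Nat) :
    ∀ (i r : Nat), (∀ j, i ≤ j → j < i + k → mask[j]? = some false) → i + k ≤ mask.length →
      pvScanNonmath text (mask.drop i) i (some r) =
        pvScanNonmath text (mask.drop (i + k)) (i + k) (some r) := by
  induction k with
  | zero => intro i r _ _; rfl
  | succ k ih =>
      intro i r hall hlen
      have hi : i < mask.length := by omega
      have h0 : mask[i]? = some false := hall i (le_refl i) (by omega)
      have hfalse : mask[i] = false := by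
        rw [List.getElem?_eq_getElem hi] at h0; exact Option.some_inj.mp h0
      rw [List.drop_eq_getElem_cons hi, hfalse]
      show pvScanNonmath text (false :: mask.drop (i+1)) i (some r) = _
      rw [show pvScanNonmath text (false :: mask.drop (i+1)) i (some r) =
        pvScanNonmath text (mask.drop (i+1)) (i+1) (some r) from by simp [pvScanNonmath]]
      have h2 := ih (i+1) r (fun j ha hb => hall j (by omega) (by omega)) (by omega)
      rw [show i + 1 + k = i + (k+1) from by omega] at h2
      exact h2

theorem pvScan_trues (text : String) (mask : List Bool) (k : Nat) :
    ∀ (i : Nat), (∀ j, i ≤ j → j < i + k → mask[j]? = some true) → i + k ≤ mask.length →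
      pvScanNonmath text (mask.drop i) i none =
        pvScanNonmath text (mask.drop (i + k)) (i + k) none := by
  induction k with
  | zero => intro i _ _; rfl
  | succ k ih =>
      intro i hall hlen
      have hi : i < mask.length := by omega
      have h0 : mask[i]? = some true := hall i (le_refl i) (by omega)
      have htrue : mask[i] = true := by
        rw [List.getElem?_eq_getElem hi] at h0; exact Option.some_inj.mp h0
      rw [List.drop_eq_getElem_cons hi, htrue]
      rw [show pvScanNonmath text (true :: mask.drop (i+1)) i none =
        pvScanNonmath text (mask.drop (i+1)) (i+1) none from by simp [pvScanNonmath]]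
      have h2 := ih (i+1) (fun j ha hb => hall j (by omega) (by omega)) (by omega)
      rw [show i + 1 + k = i + (k+1) from by omega] at h2
      exact h2

theorem pvScan_tail_false (text : String) (mask : List Bool) (i r : Nat)
    (hall : ∀ j, i ≤ j → j < mask.length → mask[j]? = some false) (hi : i ≤ mask.length) :
    pvScanNonmath text (mask.drop i) i (some r) =
      [((r : Int), (mask.length : Int), PySem.Str.slice text (some (r : Int)) none)] := by
  have := pvScan_falses text mask (mask.length - i) i r
    (fun j h1 h2 => hall j h1 (by omega)) (by omega)
  rw [show i + (mask.length - i) = mask.length from by omega] at this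
  rw [this, List.drop_length]
  rfl

-- ---- one-step scan unfoldings ----
theorem pvScan_step_false_none (text : String) (mask : List Bool) (i : Nat)
    (hi : i < mask.length) (h : mask[i]? = some false) :
    pvScanNonmath text (mask.drop i) i none = pvScanNonmath text (mask.drop (i+1)) (i+1) (some i) := by
  have hm : mask[i] = false := by rw [List.getElem?_eq_getElem hi] at h; exact Option.some_inj.mp h
  rw [List.drop_eq_getElem_cons hi, hm]
  simp [pvScanNonmath]

theorem pvScan_step_true_none (text : String) (mask : List Bool) (i : Nat)
    (hi : i < mask.length) (h : mask[i]? = some true) :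
    pvScanNonmath text (mask.drop i) i none = pvScanNonmath text (mask.drop (i+1)) (i+1) none := by
  have hm : mask[i] = true := by rw [List.getElem?_eq_getElem hi] at h; exact Option.some_inj.mp h
  rw [List.drop_eq_getElem_cons hi, hm]
  simp [pvScanNonmath]

theorem pvScan_step_true_some (text : String) (mask : List Bool) (i r : Nat)
    (hi : i < mask.length) (h : mask[i]? = some true) :
    pvScanNonmath text (mask.drop i) i (some r) =
      ((r : Int), (i : Int), PySem.Str.slice text (some (r : Int)) (some (i : Int))) ::
        pvScanNonmath text (mask.drop (i+1)) (i+1) none := by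
  have hm : mask[i] = true := by rw [List.getElem?_eq_getElem hi] at h; exact Option.some_inj.mp h
  rw [List.drop_eq_getElem_cons hi, hm]
  simp [pvScanNonmath]

-- ---- crux: A's complement walk = B's mask scan ----
theorem pvCrux (text : String) (mask : List Bool) (n : Nat) (hlen : mask.length = n) :
    ∀ (M : List (Int × Int)) (last : Nat),
      pvInv (n : Int) M → (∀ x ∈ M, (last : Int) ≤ x.1) →
      (∀ p : Nat, last ≤ p → p < n → mask[p]? = some (pvCovB M p)) →
      pvCompA text (n : Int) M (last : Int) = pvScanNonmath text (mask.drop last) last none := by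
  intro M
  induction M with
  | nil =>
      intro last _ _ hmask
      simp only [pvCompA]
      by_cases hln : last < n
      · rw [if_pos (by exact_mod_cast hln)]
        have hfalse : ∀ p, last ≤ p → p < n → mask[p]? = some false := by
          intro p h1 h2
          have := hmask p h1 h2
          simpa [pvCovB] using this
        rw [pvScan_step_false_none text mask last (by omega) (hfalse last (le_refl _) hln)]
        rw [pvScan_tail_false text mask (last+1) last
          (fun j h1 h2 => hfalse j (by omega) (by omega)) (by omega)]
        rw [hlen]
      · rw [if_neg (by exact_mod_cast hln)]
        rw [List.drop_eq_nil_of_le (by omega)]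
        rfl
  | cons q rest ih =>
      intro last hinv hstart hmask
      have hq : 0 ≤ q.1 ∧ q.1 < q.2 ∧ q.2 ≤ (n : Int) := hinv.2 q (List.mem_cons_self ..)
      have hrest_gt : ∀ x ∈ rest, q.2 < x.1 := (List.pairwise_cons.mp hinv.1).1
      have hlast_q : (last : Int) ≤ q.1 := hstart q (List.mem_cons_self ..)
      set sN := q.1.toNat with hsN
      set eN := q.2.toNat with heN
      have hs : (sN : Int) = q.1 := Int.toNat_of_nonneg hq.1
      have he : (eN : Int) = q.2 := Int.toNat_of_nonneg (by omega)
      have hse : sN < eN := by omega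
      have heLn : eN ≤ n := by omega
      have hlast_s : last ≤ sN := by omega
      have covFalse : ∀ p : Nat, last ≤ p → p < sN → pvCovB (q :: rest) p = false := by
        intro p h1 h2
        simp only [pvCovB, List.any_cons, Bool.or_eq_false_iff, decide_eq_false_iff_not,
          List.any_eq_false]
        constructor
        · omega
        · intro x hx
          have := hrest_gt x hx
          simp only [decide_eq_true_eq]
          omega
      have covTrue : ∀ p : Nat, sN ≤ p → p < eN → pvCovB (q :: rest) p = true := by
        intro p h1 h2
        simp only [pvCovB, List.any_cons, Bool.or_eq_true, decide_eq_true_eq]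
        left; omega
      have covTail : ∀ p : Nat, eN ≤ p → pvCovB (q :: rest) p = pvCovB rest p := by
        intro p h1
        simp only [pvCovB, List.any_cons]
        have : decide (q.1 ≤ (p : Int) ∧ (p : Int) < q.2) = false := by
          simp only [decide_eq_false_iff_not]; omega
        rw [this, Bool.false_or]
      have hIH : pvCompA text (n : Int) rest (q.2 : Int) =
          pvScanNonmath text (mask.drop eN) eN none := by
        rw [← he]
        refine ih eN ⟨(List.pairwise_cons.mp hinv.1).2,
          fun x hx => hinv.2 x (List.mem_cons_of_mem _ hx)⟩ ?_ ?_
        · intro x hx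
          have := hrest_gt x hx
          omega
        · intro p h1 h2
          rw [← covTail p h1]
          exact hmask p (by omega) h2
      -- consume the covered block [sN, eN) with run = none
      have hTrues : pvScanNonmath text (mask.drop (sN+1)) (sN+1) none =
          pvScanNonmath text (mask.drop eN) eN none := by
        have h2 := pvScan_trues text mask (eN - (sN+1)) (sN+1)
          (fun j h1 h2 => by rw [hmask j (by omega) (by omega), covTrue j (by omega) (by omega)])
          (by omega)
        rwa [show sN + 1 + (eN - (sN+1)) = eN from by omega] at h2
      simp only [pvCompA]
      by_cases hgap : last < sN
      · rw [if_pos (by omega)]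
        -- gap: one false step, then falses up to sN, then the emitting true step
        rw [pvScan_step_false_none text mask last (by omega)
          (by rw [hmask last (le_refl _) (by omega), covFalse last (le_refl _) hgap])]
        have hF := pvScan_falses text mask (sN - (last+1)) (last+1) last
          (fun j h1 h2 => by rw [hmask j (by omega) (by omega), covFalse j (by omega) (by omega)])
          (by omega)
        rw [show last + 1 + (sN - (last+1)) = sN from by omega] at hF
        rw [hF]
        rw [pvScan_step_true_some text mask sN last (by omega)
          (by rw [hmask sN (by omega) (by omega), covTrue sN (le_refl _) hse])]
        rw [hTrues, ← hIH, hs]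
        rfl
      · have hlast_eq : last = sN := by omega
        rw [if_neg (by omega)]
        subst hlast_eq
        rw [pvScan_step_true_none text mask sN (by omega)
          (by rw [hmask sN (le_refl _) (by omega), covTrue sN (le_refl _) hse])]
        rw [hTrues, ← hIH]
        simp

-- ===== VERDICT (by name: the statement is the Claim_ definition above) =====
theorem iterate_nonmath_segments_spec : Claim_equal_iterate_nonmath_segments := by
  intro text regions _
  unfold Spec_iterate_nonmath_segments
  unfold iterate_nonmath_segments iterate_nonmath_segments_alt
  simp only [PySem.Str.len_eq]
  set nN : Nat := text.toList.length with hnN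
  set clean := regions.foldl (pvCleanStep (nN : Int)) [] with hclean
  set cleanS := PySem.List.sorted2 clean Prod.fst Prod.snd with hcleanS
  set merged := cleanS.foldl pvMergeStep [] with hmerged
  set mask := regions.foldl (pvMaskStep nN) (List.replicate nN false) with hmask_def
  -- A's final loop as a recursion
  rw [pvCompA_foldl text (nN : Int) merged 0 []]
  rw [List.nil_append]
  -- merged's invariant and coverage
  have hperm := PySem.List.sorted2_perm clean Prod.fst Prod.snd false
  have hbounds : ∀ y ∈ cleanS, 0 ≤ y.1 ∧ y.1 < y.2 ∧ y.2 ≤ (nN : Int) := by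
    intro y hy
    exact pvClean_bounds (nN : Int) (by positivity) regions y (hperm.mem_iff.mp hy)
  have hmf := pvMerge_fold (nN : Int) cleanS [] (pvSorted2_pairwise_fst_le clean) hbounds
    ⟨List.Pairwise.nil, by simp⟩ (by simp)
  have hcovm : ∀ p : Nat, pvCovB merged p = pvCovC (nN : Int) regions p := by
    intro p
    rw [hmf.2 p]
    have h1 : pvCovB cleanS p = pvCovB clean p := hperm.any_eq
    rw [show pvCovB ([] : List (Int × Int)) p = false from rfl, Bool.false_or, h1,
      hclean, pvCovB_clean]
  have hlen : mask.length = nN := by rw [hmask_def, pvMask_len, List.length_replicate]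
  have hcrux := pvCrux text mask nN hlen merged 0 hmf.1
    (fun x hx => by have := hmf.1.2 x hx; simpa using this.1)
    (fun p _ hp => by
      rw [hmask_def, pvMask_get nN regions _ p (by simpa using hp)]
      rw [List.getD_eq_getElem _ _ (by simpa using hp)]
      simp only [List.getElem_replicate, Bool.false_or]
      rw [hcovm p])
  rw [show ((0 : Nat) : Int) = 0 from rfl] at hcrux
  rw [hcrux, List.drop_zero]
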